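-- pv_equiv track=rewrite | github.com/WooHyunKing/CodingTest_study | Greedy/Muji_MukbangLive.py | solution
-- ===== SOURCE A (Python) =====
-- from operator import itemgetter
--
-- def solution(food_times, k):
--
--     foods = []
--     food_count = len(food_times) # 가로(남은 음식 개수)
--
--     # 튜플 자료형으로 음식의 소요 시간과 인덱스를 저장
--     for i in range(food_count):
--         foods.append((food_times[i],i+1))
--
--     # 튜플 자료형은 첫 번째 원소를 기준으로 정렬 !
--     foods.sort()
--
--     pretime = 0
--
--     # enumerate() 함수는 기본적으로 인덱스와 원소로 이루어진 튜플(tuple)을 만들어줍니다. 따라서 인덱스와 원소를 각각 다른 변수에 할당하고 싶다면 인자 풀기(unpacking)를 해줘야 합니다.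
--     for i,food in enumerate(foods):
--         diff = food[0] - pretime # 세로(소요 시간)
--         if diff != 0:
--             spend = diff*food_count # 총 소요시간(세로 x 가로)
--
--             if spend <= k: # 총 소요시간이 k보다 쟉은 경우
--                 k -= spend
--                 pretime = food[0]
--
--             else: # 총 소요시간이 k 보다 오래 걸릴 경우
--                 k %= food_count # 나머지 계산
--                 sublist = sorted(foods[i:],key = itemgetter(1)) # 인덱스 기준으로 재정렬
--                 return sublist[k][1] # 정답 인덱스
--
--         food_count -= 1 # 하나의 음식을 모두 섭취했으니 남은 음식 개수 최신화
--
--     return -1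
-- ===== SOURCE B (Python) =====
-- def solution(food_times, k):
--     # Binary search on the absolute cost function g(i) = pref[i] + s[i]*(n-i)
--     # (time needed to fully eat the first i sorted foods and raise the rest to
--     # level s[i]) instead of simulating the greedy consumption.
--     n = len(food_times)
--     s = sorted(food_times)
--     pref = [0]
--     for v in s:
--         pref.append(pref[-1] + v)
--     if n == 0 or pref[n] <= k:
--         return -1
--     lo, hi = 0, n - 1
--     while lo < hi:
--         mid = (lo + hi) // 2
--         if pref[mid] + s[mid] * (n - mid) > k:
--             hi = mid
--         else:
--             lo = mid + 1
--     j = lo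
--     if j == 0 and s[0] == 0:
--         # the run of zero-time foods at the front is eaten instantly
--         while j < n and s[j] == 0:
--             j += 1
--         if j == n:
--             return -1
--     rem = n - j
--     prev = s[j - 1] if j > 0 else 0
--     idx = (k - (pref[j] + prev * rem)) % rem
--     survivors = [i + 1 for i, ft in enumerate(food_times) if ft >= s[j]]
--     return survivors[idx]
-- ===== Notes on version B (the rewrite author's own statement) =====
-- stated objective: faster
-- what changed: B replaces A's sequential greedy simulation (consuming k in value-gap-times-remaining chunks over a sorted (time,index) tuple list) by a non-simulating formulation: it sorts the bare values, builds a prefix-sum array, binary-searches the monotone absolute-cost function g(i)=pref[i]+s[i]*(n-i) for the first index exceeding the original k, handles the leading zero-run, and reads the answer off a filtered enumerate of the original list.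
import Mathlib
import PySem

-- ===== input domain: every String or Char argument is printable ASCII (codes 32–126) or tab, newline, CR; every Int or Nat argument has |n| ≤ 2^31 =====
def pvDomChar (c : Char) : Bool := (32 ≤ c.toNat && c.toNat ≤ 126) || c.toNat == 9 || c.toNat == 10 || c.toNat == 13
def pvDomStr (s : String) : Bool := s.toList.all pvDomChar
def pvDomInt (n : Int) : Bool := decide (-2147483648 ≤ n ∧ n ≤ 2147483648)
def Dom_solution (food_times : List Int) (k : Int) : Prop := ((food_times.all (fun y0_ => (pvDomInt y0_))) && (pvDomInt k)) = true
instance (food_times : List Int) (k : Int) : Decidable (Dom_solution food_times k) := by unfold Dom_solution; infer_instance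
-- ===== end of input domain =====

-- B replaces A's greedy simulation over the sorted (time, index) tuple list by a binary search
-- on the monotone absolute-cost function g(i) = pref[i] + s[i]*(n-i) over the sorted bare values,
-- plus a leading-zero-run skip; objective: faster (measured).

-- ===== PORT A =====
-- the for-loop over enumerate(foods) with its early return; food_count/pretime/k are the loop state
def solutionLoop : List (Int × Int) → Int → Int → Int → Int
  | [], _, _, _ => -1
  | food :: tl, food_count, pretime, k =>
    let diff := food.1 - pretime
    if diff ≠ 0 then
      let spend := diff * food_count
      if spend ≤ k then
        solutionLoop tl (food_count - 1) food.1 (k - spend)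
      else
        -- sublist[k % food_count]; the index is provably in range, so pyGetD is exact here
        let sublist := PySem.List.sorted (food :: tl) (fun p => p.2)
        (PySem.List.pyGetD sublist (PySem.Int.mod k food_count) (0, 0)).2
    else
      solutionLoop tl (food_count - 1) pretime k

def solution (food_times : List Int) (k : Int) : Int :=
  let foods := (PySem.List.enumerate food_times).map (fun p => (p.2, p.1 + 1))
  let foods2 := PySem.List.sorted2 foods (fun p => p.1) (fun p => p.2)
  solutionLoop foods2 (food_times.length : Int) 0 k

-- ===== PORT B =====
-- pref = [0]; for v in s: pref.append(pref[-1] + v)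
def prefOf (s : List Int) : List Int :=
  s.foldl (fun pr v => pr ++ [PySem.List.pyGetD pr (-1) 0 + v]) [0]

-- pref[i] + s[i]*(n-i); indices are provably in range at every use, so pyGetD is exact here
def gAt (pref s : List Int) (n i : Int) : Int :=
  PySem.List.pyGetD pref i 0 + PySem.List.pyGetD s i 0 * (n - i)

-- while lo < hi: mid = (lo+hi)//2; if g(mid) > k: hi = mid else lo = mid+1
def bsearch (pref s : List Int) (n k lo hi : Int) : Int :=
  if h : lo < hi then
    if gAt pref s n (PySem.Int.floordiv (lo + hi) 2) > k then
      bsearch pref s n k lo (PySem.Int.floordiv (lo + hi) 2)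
    else
      bsearch pref s n k (PySem.Int.floordiv (lo + hi) 2 + 1) hi
  else lo
termination_by (hi - lo).toNat
decreasing_by
  · have hlt : PySem.Int.floordiv (lo + hi) 2 < hi := by
      rw [PySem.Int.floordiv_lt_iff_lt_mul (by omega : (0:Int) < 2)]; omega
    omega
  · have hb := PySem.Int.floordiv_two_mid_bounds (lo := lo) (hi := hi) (le_of_lt h)
    omega

-- while j < n and s[j] == 0: j += 1
def skipZeros (s : List Int) (n j : Int) : Int :=
  if h : j < n ∧ PySem.List.pyGetD s j 0 = 0 then skipZeros s n (j + 1) else j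
termination_by (n - j).toNat
decreasing_by obtain ⟨h1, _⟩ := h; omega

-- [i + 1 for i, ft in enumerate(food_times) if ft >= t]
def survivorsOf (food_times : List Int) (t : Int) : List Int :=
  (PySem.List.enumerate food_times).filterMap (fun p => if p.2 ≥ t then some (p.1 + 1) else none)

-- the shared tail after the search: rem/prev/idx/survivors and the final lookup
def finishAt (food_times : List Int) (k : Int) (s pref : List Int) (n j : Int) : Int :=
  let rem := n - j
  let prev := if j > 0 then PySem.List.pyGetD s (j - 1) 0 else 0
  let idx := PySem.Int.mod (k - (PySem.List.pyGetD pref j 0 + prev * rem)) rem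
  PySem.List.pyGetD (survivorsOf food_times (PySem.List.pyGetD s j 0)) idx 0

def solution_alt (food_times : List Int) (k : Int) : Int :=
  let n : Int := (food_times.length : Int)
  let s := PySem.List.sorted food_times (fun x => x)
  let pref := prefOf s
  if n = 0 ∨ PySem.List.pyGetD pref n 0 ≤ k then -1
  else
    let j := bsearch pref s n k 0 (n - 1)
    if j = 0 ∧ PySem.List.pyGetD s 0 0 = 0 then
      let j' := skipZeros s n j
      if j' = n then -1 else finishAt food_times k s pref n j'
    else finishAt food_times k s pref n j

-- ===== PRECONDITION & SPEC =====
def Spec_solution (food_times : List Int) (k : Int) (out : Int) : Prop := out = solution_alt food_times k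
instance (food_times : List Int) (k : Int) (out : Int) : Decidable (Spec_solution food_times k out) := by unfold Spec_solution; infer_instance

-- ===== CLAIM (what is proved, stated in full; the proofs are below) =====
def Claim_equal_solution : Prop := ∀ (food_times : List Int) (k : Int), Dom_solution food_times k → Spec_solution food_times k (solution food_times k)

-- ===== LEMMAS AND PROOFS =====

def sval (s : List Int) (j : Nat) : Int := s.getD j 0

def Pt (s : List Int) (j : Nat) : Int := (s.take j).sum

def prevv (s : List Int) (j : Nat) : Int := if j = 0 then 0 else s.getD (j - 1) 0

def fjv (s : List Int) (n j : Nat) : Int := Pt s j + prevv s j * ((n : Int) - (j : Int))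

def gv (s : List Int) (n j : Nat) : Int := Pt s j + sval s j * ((n : Int) - (j : Int))

theorem Pt_succ (s : List Int) (j : Nat) (hj : j < s.length) :
    Pt s (j + 1) = Pt s j + sval s j := by
  unfold Pt sval
  rw [List.take_add_one, List.sum_append, List.getElem?_eq_getElem hj, List.getD_eq_getElem _ _ hj]
  simp

theorem fjv_succ (s : List Int) (n j : Nat) (hj : j < s.length) :
    fjv s n (j + 1) = gv s n j := by
  have h := Pt_succ s j hj
  simp only [fjv, gv, prevv, sval] at *
  rw [h, if_neg (by omega : ¬ j + 1 = 0)]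
  simp only [Nat.add_sub_cancel]
  push_cast
  ring

theorem gv_dup (s : List Int) (n j : Nat) (hj : j + 1 < s.length)
    (h : sval s (j + 1) = sval s j) : gv s n (j + 1) = gv s n j := by
  have hp := Pt_succ s j (by omega)
  simp only [gv] at *
  rw [hp, h]
  push_cast
  ring

def failb (s : List Int) (k : Int) (n j : Nat) : Bool :=
  decide (sval s j ≠ prevv s j) && decide (gv s n j > k)

def ansA (S : List (Int × Int)) (s : List Int) (n : Nat) (k : Int) (j0 : Nat) : Int :=
  (PySem.List.pyGetD (PySem.List.sorted (S.drop j0) (fun p => p.2))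
    (PySem.Int.mod (k - fjv s n j0) ((n : Int) - (j0 : Int))) (0, 0)).2

theorem loopA_step (S : List (Int × Int)) (s : List Int) (k : Int) (n : Nat)
    (hn : n = S.length) (hs : S.map (fun e => e.1) = s) (j : Nat) (hj : j < n)
    (hnf : failb s k n j = false) :
    solutionLoop (S.drop j) ((n : Int) - (j : Int)) (prevv s j) (k - fjv s n j)
      = solutionLoop (S.drop (j + 1)) ((n : Int) - ((j + 1 : Nat) : Int)) (prevv s (j + 1))
          (k - fjv s n (j + 1)) := by
  have hsl : s.length = n := by rw [← hs, List.length_map, hn]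
  have hjS : j < S.length := by omega
  have hdrop : S.drop j = S[j] :: S.drop (j + 1) := List.drop_eq_getElem_cons hjS
  have he1 : S[j].1 = sval s j := by
    unfold sval
    rw [← hs, List.getD_eq_getElem _ _ (by simpa using hjS), List.getElem_map]
  have hfc : ((n : Int) - (j : Int)) - 1 = (n : Int) - ((j + 1 : Nat) : Int) := by
    push_cast; ring
  rw [hdrop]
  simp only [solutionLoop]
  by_cases hd : sval s j = prevv s j
  · rw [if_neg (by rw [he1, hd]; simp)]
    have hpv : prevv s (j + 1) = prevv s j := by
      have h1 : prevv s (j + 1) = s.getD j 0 := by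
        unfold prevv; rw [if_neg (by omega)]; simp
      rw [h1, show s.getD j 0 = sval s j from rfl, hd]
    have hfj : fjv s n (j + 1) = fjv s n j := by
      rw [fjv_succ s n j (by omega)]
      unfold gv fjv
      rw [hd]
    rw [hfc, hfj, hpv]
  · have hne : ¬ S[j].1 - prevv s j = 0 := by
      rw [he1]
      exact sub_ne_zero.mpr hd
    rw [if_pos hne]
    have hg : gv s n j ≤ k := by
      unfold failb at hnf
      simp only [Bool.and_eq_false_iff, decide_eq_false_iff_not, not_not, gt_iff_lt, not_lt] at hnf
      rcases hnf with h | h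
      · exact absurd h hd
      · exact h
    have hspend : (S[j].1 - prevv s j) * ((n : Int) - (j : Int)) = gv s n j - fjv s n j := by
      rw [he1]; unfold gv fjv; ring
    rw [if_pos (by rw [hspend]; linarith)]
    have hpv : S[j].1 = prevv s (j + 1) := by
      have h1 : prevv s (j + 1) = s.getD j 0 := by
        unfold prevv; rw [if_neg (by omega)]; simp
      rw [h1]; exact he1
    have hfj : k - fjv s n j - (S[j].1 - prevv s j) * ((n : Int) - (j : Int))
        = k - fjv s n (j + 1) := by
      rw [hspend, fjv_succ s n j (by omega)]; ring
    rw [hfc, hfj, hpv]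

theorem loopA_none (S : List (Int × Int)) (s : List Int) (k : Int) (n : Nat)
    (hn : n = S.length) (hs : S.map (fun e => e.1) = s) :
    ∀ (m j : Nat), n - j = m → j ≤ n →
    (∀ i, j ≤ i → i < n → failb s k n i = false) →
    solutionLoop (S.drop j) ((n : Int) - (j : Int)) (prevv s j) (k - fjv s n j) = -1 := by
  intro m
  induction m with
  | zero =>
    intro j hm hj _
    have hjn : j = n := by omega
    subst hjn
    rw [List.drop_of_length_le (by omega)]
    rfl
  | succ m ih =>
    intro j hm hj hnone
    have hjn : j < n := by omega
    rw [loopA_step S s k n hn hs j hjn (hnone j le_rfl hjn)]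
    exact ih (j + 1) (by omega) (by omega) (fun i h1 h2 => hnone i (by omega) h2)

theorem loopA_fail (S : List (Int × Int)) (s : List Int) (k : Int) (n : Nat)
    (hn : n = S.length) (hs : S.map (fun e => e.1) = s)
    (j0 : Nat) (hj0 : j0 < n) (hf : failb s k n j0 = true) :
    ∀ (m j : Nat), j0 - j = m → j ≤ j0 →
    (∀ i, j ≤ i → i < j0 → failb s k n i = false) →
    solutionLoop (S.drop j) ((n : Int) - (j : Int)) (prevv s j) (k - fjv s n j)
      = ansA S s n k j0 := by
  intro m
  induction m with
  | zero =>
    intro j hm hj _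
    have hjj : j = j0 := by omega
    subst hjj
    have hjS : j < S.length := by omega
    have hdrop : S.drop j = S[j] :: S.drop (j + 1) := List.drop_eq_getElem_cons hjS
    have he1 : S[j].1 = sval s j := by
      unfold sval
      rw [← hs, List.getD_eq_getElem _ _ (by simpa using hjS), List.getElem_map]
    unfold failb at hf
    simp only [Bool.and_eq_true, decide_eq_true_eq, gt_iff_lt] at hf
    obtain ⟨hd, hg⟩ := hf
    have hspend : (S[j].1 - prevv s j) * ((n : Int) - (j : Int)) = gv s n j - fjv s n j := by
      rw [he1]; unfold gv fjv; ring
    rw [hdrop]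
    simp only [solutionLoop]
    rw [if_pos (by rw [he1]; exact sub_ne_zero.mpr hd)]
    rw [if_neg (by rw [hspend]; omega)]
    unfold ansA
    rw [hdrop]
  | succ m ih =>
    intro j hm hj hnone
    have hjn : j < j0 := by omega
    rw [loopA_step S s k n hn hs j (by omega) (hnone j le_rfl hjn)]
    exact ih (j + 1) (by omega) (by omega) (fun i h1 h2 => hnone i (by omega) h2)

def scanSums : Int → List Int → List Int
  | _, [] => []
  | a, v :: t => (a + v) :: scanSums (a + v) t

theorem pref_foldl : ∀ (s pr : List Int) (a : Int),
    s.foldl (fun pr v => pr ++ [PySem.List.pyGetD pr (-1) 0 + v]) (pr ++ [a])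
      = (pr ++ [a]) ++ scanSums a s := by
  intro s
  induction s with
  | nil => intro pr a; simp [scanSums]
  | cons v t ih =>
    intro pr a
    rw [List.foldl_cons, PySem.List.pyGetD_neg_one_append_singleton]
    have h1 : pr ++ [a] ++ [a + v] = (pr ++ [a]) ++ [a + v] := by simp
    rw [h1, ih (pr ++ [a]) (a + v)]
    simp [scanSums]

theorem prefOf_eq (s : List Int) : prefOf s = 0 :: scanSums 0 s := by
  have := pref_foldl s [] 0
  simpa [prefOf] using this

theorem scanSums_getD : ∀ (s : List Int) (a : Int) (j : Nat), j < s.length →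
    (scanSums a s).getD j 0 = a + (s.take (j + 1)).sum := by
  intro s
  induction s with
  | nil => intro a j hj; simp at hj
  | cons v t ih =>
    intro a j hj
    cases j with
    | zero => simp [scanSums]
    | succ j =>
      have := ih (a + v) j (by simpa using hj)
      simp only [scanSums, List.getD_cons_succ, List.take_succ_cons, List.sum_cons]
      rw [this]; ring

theorem pref_getD (s : List Int) (j : Nat) (hj : j ≤ s.length) :
    (prefOf s).getD j 0 = Pt s j := by
  rw [prefOf_eq]
  cases j with
  | zero => simp [Pt]
  | succ j =>
    rw [List.getD_cons_succ, scanSums_getD s 0 j (by omega)]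
    simp [Pt]

theorem gAt_eq (s : List Int) (j : Nat) (hj : j < s.length) :
    gAt (prefOf s) s (s.length : Int) (j : Int) = gv s s.length j := by
  unfold gAt gv
  rw [PySem.List.pyGetD_natCast, PySem.List.pyGetD_natCast,
    pref_getD s j (by omega)]
  rfl

theorem sval_mono (xs : List Int) (i j : Nat) (hij : i ≤ j)
    (hj : j < (PySem.List.sorted xs (fun x => x)).length) :
    sval (PySem.List.sorted xs (fun x => x)) i ≤ sval (PySem.List.sorted xs (fun x => x)) j := by
  unfold sval
  rw [List.getD_eq_getElem _ _ (by omega), List.getD_eq_getElem _ _ hj]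
  exact PySem.List.sorted_id_getElem_mono xs hij hj

theorem gv_mono (xs : List Int) (n : Nat) (hn : n = (PySem.List.sorted xs (fun x => x)).length) :
    ∀ (i j : Nat), i ≤ j → j < n →
    gv (PySem.List.sorted xs (fun x => x)) n i ≤ gv (PySem.List.sorted xs (fun x => x)) n j := by
  intro i j
  induction j with
  | zero => intro hij _; have : i = 0 := by omega
            subst this; exact le_rfl
  | succ j ih =>
    intro hij hjn
    by_cases hi : i = j + 1
    · subst hi; exact le_rfl
    · have h1 : gv (PySem.List.sorted xs (fun x => x)) n i
          ≤ gv (PySem.List.sorted xs (fun x => x)) n j := ih (by omega) (by omega)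
      refine le_trans h1 ?_
      set s := PySem.List.sorted xs (fun x => x) with hsdef
      have hn' : n = s.length := by rw [hn, hsdef]
      have hl : j + 1 < (PySem.List.sorted xs (fun x => x)).length := by
        rw [← hsdef]; omega
      have hsv : sval s j ≤ sval s (j + 1) := sval_mono xs j (j + 1) (by omega) hl
      have hp := Pt_succ s j (by omega)
      have hkey : gv s n (j + 1) - gv s n j
          = (sval s (j + 1) - sval s j) * ((n : Int) - (j : Int) - 1) := by
        unfold gv
        rw [hp]
        push_cast
        ring
      have hnn : (0 : Int) ≤ (sval s (j + 1) - sval s j) * ((n : Int) - (j : Int) - 1) := by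
        apply mul_nonneg (by omega)
        have : (j : Int) + 1 < (n : Int) := by exact_mod_cast hjn
        omega
      omega

theorem bsearch_spec (s : List Int) (k : Int) :
    ∀ (m : Nat) (lo hi : Int), (hi - lo).toNat ≤ m →
    0 ≤ lo → lo ≤ hi → hi < (s.length : Int) →
    (∀ i : Nat, (i : Int) < lo → gv s s.length i ≤ k) →
    gv s s.length hi.toNat > k →
    (∀ i j : Nat, i ≤ j → j < s.length → gv s s.length i ≤ gv s s.length j) →
    ∃ r : Nat, bsearch (prefOf s) s (s.length : Int) k lo hi = (r : Int) ∧
      lo ≤ (r : Int) ∧ (r : Int) ≤ hi ∧ gv s s.length r > k ∧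
      (∀ i : Nat, i < r → gv s s.length i ≤ k) := by
  intro m
  induction m with
  | zero =>
    intro lo hi hm h0 hlh hhn hlow hhi hmono
    have heq : lo = hi := by omega
    refine ⟨hi.toNat, ?_, ?_, ?_, hhi, ?_⟩
    · rw [bsearch, dif_neg (by omega)]
      omega
    · omega
    · omega
    · intro i hi2
      exact hlow i (by omega)
  | succ m ih =>
    intro lo hi hm h0 hlh hhn hlow hhi hmono
    by_cases h : lo < hi
    · have hb := PySem.Int.floordiv_two_mid_bounds (lo := lo) (hi := hi) (le_of_lt h)
      have hltm : PySem.Int.floordiv (lo + hi) 2 < hi := by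
        rw [PySem.Int.floordiv_lt_iff_lt_mul (by omega : (0:Int) < 2)]; omega
      set mid := PySem.Int.floordiv (lo + hi) 2 with hmid
      have hmid0 : 0 ≤ mid := by omega
      have hmidn : mid = ((mid.toNat : Nat) : Int) := by omega
      have hgat : gAt (prefOf s) s ((s.length : Nat) : Int) mid = gv s s.length mid.toNat := by
        rw [hmidn]
        exact gAt_eq s mid.toNat (by omega)
      rw [bsearch, dif_pos h, ← hmid]
      by_cases hc : gAt (prefOf s) s ((s.length : Nat) : Int) mid > k
      · rw [if_pos hc]
        have hgm : gv s s.length mid.toNat > k := by rw [← hgat]; exact hc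
        obtain ⟨r, he, h1, h2, h3, h4⟩ :=
          ih lo mid (by omega) h0 (by omega) (by omega) hlow hgm hmono
        exact ⟨r, he, h1, by omega, h3, h4⟩
      · rw [if_neg hc]
        have hgm : gv s s.length mid.toNat ≤ k := by
          have := hgat
          omega
        have hlow' : ∀ i : Nat, (i : Int) < mid + 1 → gv s s.length i ≤ k := by
          intro i hi2
          by_cases hil : (i : Int) < lo
          · exact hlow i hil
          · exact le_trans (hmono i mid.toNat (by omega) (by omega)) hgm
        obtain ⟨r, he, h1, h2, h3, h4⟩ :=
          ih (mid + 1) hi (by omega) (by omega) (by omega) hhn hlow' hhi hmono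
        exact ⟨r, he, by omega, h2, h3, h4⟩
    · have heq : lo = hi := by omega
      refine ⟨hi.toNat, ?_, by omega, by omega, hhi, ?_⟩
      · rw [bsearch, dif_neg (by omega)]
        omega
      · intro i hi2
        exact hlow i (by omega)

theorem skip_spec (s : List Int) :
    ∀ (m : Nat) (j : Int), ((s.length : Int) - j).toNat ≤ m → 0 ≤ j → j ≤ (s.length : Int) →
    ∃ r : Nat, skipZeros s (s.length : Int) j = (r : Int) ∧ j ≤ (r : Int) ∧ r ≤ s.length ∧
      (∀ i : Nat, j ≤ (i : Int) → i < r → s.getD i 0 = 0) ∧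
      (r < s.length → s.getD r 0 ≠ 0) := by
  intro m
  induction m with
  | zero =>
    intro j hm h0 hjn
    have heq : j = (s.length : Int) := by omega
    refine ⟨s.length, ?_, by omega, le_rfl, ?_, by omega⟩
    · rw [skipZeros, dif_neg (by omega)]
      omega
    · intro i h1 h2
      omega
  | succ m ih =>
    intro j hm h0 hjn
    by_cases hlt : j < (s.length : Int)
    · have hjn2 : j = ((j.toNat : Nat) : Int) := by omega
      have hget : PySem.List.pyGetD s j 0 = s.getD j.toNat 0 := by
        conv_lhs => rw [hjn2]
        rw [PySem.List.pyGetD_natCast]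
      by_cases hz : s.getD j.toNat 0 = 0
      · rw [skipZeros, dif_pos ⟨hlt, by rw [hget]; exact hz⟩]
        obtain ⟨r, he, h1, h2, h3, h4⟩ := ih (j + 1) (by omega) (by omega) (by omega)
        refine ⟨r, he, by omega, h2, ?_, h4⟩
        intro i hi1 hi2
        by_cases hij : (i : Int) = j
        · have : i = j.toNat := by omega
          rw [this]; exact hz
        · exact h3 i (by omega) hi2
      · rw [skipZeros, dif_neg (by rw [hget]; tauto)]
        refine ⟨j.toNat, by omega, by omega, by omega, ?_, fun _ => hz⟩
        intro i h1 h2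
        omega
    · have heq : j = (s.length : Int) := by omega
      refine ⟨s.length, ?_, by omega, le_rfl, ?_, by omega⟩
      · rw [skipZeros, dif_neg (by omega)]
        omega
      · intro i h1 h2
        omega

def foodsOf (food_times : List Int) : List (Int × Int) :=
  (PySem.List.enumerate food_times).map (fun p => (p.2, p.1 + 1))

def ltb (a b : Int × Int) : Bool :=
  decide (a.1 < b.1) || (!decide (b.1 < a.1) && decide (a.2 < b.2))

def WLE (a b : Int × Int) : Prop := a.1 < b.1 ∨ (a.1 = b.1 ∧ a.2 ≤ b.2)

theorem ltb_false_iff (a b : Int × Int) : ltb b a = false ↔ WLE a b := by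
  simp [ltb, WLE]; omega

theorem insertBy_pairwise (x : Int × Int) (acc : List (Int × Int))
    (h : acc.Pairwise (fun a b => ltb b a = false)) :
    (PySem.List.insertBy ltb x acc).Pairwise (fun a b => ltb b a = false) := by
  induction acc with
  | nil => simp [PySem.List.insertBy]
  | cons y ys ih =>
    rcases h with _ | ⟨hy, hys⟩
    by_cases hxy : ltb x y = true
    · rw [PySem.List.insertBy, if_pos hxy]
      refine List.Pairwise.cons ?_ (List.Pairwise.cons hy hys)
      intro z hz0
      rcases List.mem_cons.mp hz0 with rfl | hz
      · simp only [ltb] at hxy ⊢; simp at hxy ⊢; omega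
      · have := hy z hz
        simp only [ltb] at hxy this ⊢; simp at hxy this ⊢; omega
    · rw [PySem.List.insertBy, if_neg hxy]
      refine List.Pairwise.cons ?_ (ih hys)
      intro z hz
      rw [PySem.List.mem_insertBy] at hz
      rcases hz with rfl | hz
      · simpa using hxy
      · exact hy z hz

theorem sorted2_pairwise (xs : List (Int × Int)) :
    (PySem.List.sorted2 xs (fun p => p.1) (fun p => p.2)).Pairwise WLE := by
  have key : ∀ (l : List (Int × Int)) (acc : List (Int × Int)),
      acc.Pairwise (fun a b => ltb b a = false) →
      (l.foldl (fun acc x => PySem.List.insertBy ltb x acc) acc).Pairwise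
        (fun a b => ltb b a = false) := by
    intro l
    induction l with
    | nil => intro acc h; simpa using h
    | cons x t ih => intro acc h; exact ih _ (insertBy_pairwise x acc h)
  have h0 : (PySem.List.sorted2 xs (fun p => p.1) (fun p => p.2)).Pairwise
      (fun a b => ltb b a = false) := by
    have := key xs [] (by simp)
    simpa [PySem.List.sorted2, ltb] using this
  exact h0.imp (fun {a b} hab => (ltb_false_iff a b).mp hab)

theorem foods_map_fst (food_times : List Int) :
    (foodsOf food_times).map (fun e => e.1) = food_times := by
  simp [foodsOf, List.map_map, Function.comp_def]

theorem foods_pairwise_snd (food_times : List Int) :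
    (foodsOf food_times).Pairwise (fun a b => a.2 < b.2) := by
  have := PySem.List.pairwise_lt_enumerate food_times 0
  exact List.Pairwise.map _ (fun {a b} h => by simpa using by omega) this

theorem survivors_eq (food_times : List Int) (t : Int) :
    survivorsOf food_times t
      = ((foodsOf food_times).filter (fun e => decide (t ≤ e.1))).map (fun e => e.2) := by
  have aux : ∀ (l : List (Int × Int)),
      l.filterMap (fun p => if p.2 ≥ t then some (p.1 + 1) else none)
        = ((l.map (fun p => (p.2, p.1 + 1))).filter (fun e => decide (t ≤ e.1))).map
            (fun e => e.2) := by
    intro l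
    induction l with
    | nil => rfl
    | cons x xs ih =>
      by_cases hx : t ≤ x.2
      · simp [hx, ih]
      · simp [hx, ih]
  exact aux (PySem.List.enumerate food_times)

theorem ansA_eq_finish (food_times : List Int) (k : Int) (j0 : Nat)
    (hj0 : j0 < food_times.length)
    (hGS : sval (PySem.List.sorted food_times (fun x => x)) j0
        ≠ prevv (PySem.List.sorted food_times (fun x => x)) j0) :
    ansA (PySem.List.sorted2 (foodsOf food_times) (fun p => p.1) (fun p => p.2))
        (PySem.List.sorted food_times (fun x => x)) food_times.length k j0
      = finishAt food_times k (PySem.List.sorted food_times (fun x => x))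
          (prefOf (PySem.List.sorted food_times (fun x => x)))
          (food_times.length : Int) (j0 : Int) := by
  set n := food_times.length with hn
  set s := PySem.List.sorted food_times (fun x => x) with hsdef
  set S := PySem.List.sorted2 (foodsOf food_times) (fun p => p.1) (fun p => p.2) with hSdef
  have hSperm : S.Perm (foodsOf food_times) := PySem.List.sorted2_perm _ _ _ false
  have hflen : (foodsOf food_times).length = n := by
    simp [foodsOf]
    rw [hn]
  have hSlen : S.length = n := hSperm.length_eq.trans hflen
  have hpwS : S.Pairwise WLE := sorted2_pairwise _
  have hsmap : S.map (fun e => e.1) = s := by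
    have hperm2 : (S.map (fun e => e.1)).Perm food_times := by
      have := hSperm.map (fun e => e.1)
      rwa [foods_map_fst] at this
    have hpw2 : (S.map (fun e => e.1)).Pairwise (· ≤ ·) :=
      List.Pairwise.map _ (fun {a b} hab => by
        rcases hab with h | ⟨h, _⟩
        · exact le_of_lt h
        · exact le_of_eq h) hpwS
    exact (PySem.List.sorted_id_eq_of_perm_of_pairwise _ _ hperm2 hpw2).symm
  have hslen : s.length = n := by rw [← hsmap, List.length_map, hSlen]
  have hj0S : j0 < S.length := by omega
  have hSget1 : ∀ (i : Nat) (hi : i < S.length), S[i].1 = s.getD i 0 := by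
    intro i hi
    rw [← hsmap, List.getD_eq_getElem _ _ (by simpa using hi), List.getElem_map]
  have hmono' : ∀ p q : Nat, p ≤ q → q < n → s.getD p 0 ≤ s.getD q 0 := by
    intro p q hpq hq
    have hq' : q < s.length := by omega
    have hp' : p < s.length := by omega
    rw [List.getD_eq_getElem _ _ hp', List.getD_eq_getElem _ _ hq']
    exact PySem.List.sorted_id_getElem_mono food_times hpq (by rw [← hsdef]; exact hq')
  set t := sval s j0 with htdef
  have htake : ∀ e ∈ S.take j0, e.1 < t := by
    intro e he
    obtain ⟨i, hi, hei⟩ := List.mem_iff_getElem.mp he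
    have hi2 : i < j0 ∧ i < S.length := by
      constructor <;> [skip; skip] <;>
        · have := hi; simp [List.length_take] at this; omega
    have hj0pos : 0 < j0 := by omega
    have heS : e = S[i] := by
      rw [← hei, List.getElem_take]
    have he1 : e.1 = s.getD i 0 := by rw [heS, hSget1 i hi2.2]
    have hiS : i < S.length := hi2.2
    have hm1 : s.getD i 0 ≤ s.getD (j0 - 1) 0 := hmono' i (j0 - 1) (by omega) (by omega)
    have hm2 : s.getD (j0 - 1) 0 ≤ s.getD j0 0 := hmono' (j0 - 1) j0 (by omega) (by omega)
    have hne : s.getD j0 0 ≠ s.getD (j0 - 1) 0 := by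
      have : prevv s j0 = s.getD (j0 - 1) 0 := by
        unfold prevv; rw [if_neg (by omega)]
      rw [← this]
      exact hGS
    rw [he1, htdef]
    unfold sval
    omega
  have hdropc : S.drop j0 = S[j0] :: S.drop (j0 + 1) := List.drop_eq_getElem_cons hj0S
  have hdropge : ∀ e ∈ S.drop j0, t ≤ e.1 := by
    intro e he
    have hhead : S[j0].1 = t := by rw [hSget1 j0 hj0S, htdef]; rfl
    rw [hdropc] at he
    rcases List.mem_cons.mp he with rfl | he2
    · omega
    · have hpwdrop : (S.drop j0).Pairwise WLE := hpwS.drop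
      rw [hdropc] at hpwdrop
      have := (List.pairwise_cons.mp hpwdrop).1 e he2
      rcases this with h | ⟨h, _⟩ <;> omega
  have hfilter : S.filter (fun e => decide (t ≤ e.1)) = S.drop j0 := by
    conv_lhs => rw [← List.take_append_drop j0 S]
    rw [List.filter_append]
    have h1 : (S.take j0).filter (fun e => decide (t ≤ e.1)) = [] := by
      apply List.filter_eq_nil_iff.mpr
      intro e he
      have := htake e he
      simp
      omega
    have h2 : (S.drop j0).filter (fun e => decide (t ≤ e.1)) = S.drop j0 := by
      apply List.filter_eq_self.mpr
      intro e he
      simpa using hdropge e he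
    rw [h1, h2, List.nil_append]
  have hys_perm : ((foodsOf food_times).filter (fun e => decide (t ≤ e.1))).Perm (S.drop j0) := by
    rw [← hfilter]
    exact (hSperm.filter _).symm
  have hys_pw : ((foodsOf food_times).filter (fun e => decide (t ≤ e.1))).Pairwise
      (fun a b => a.2 < b.2) :=
    List.Pairwise.sublist List.filter_sublist (foods_pairwise_snd food_times)
  have hsub : PySem.List.sorted (S.drop j0) (fun p => p.2)
      = (foodsOf food_times).filter (fun e => decide (t ≤ e.1)) :=
    PySem.List.sorted_eq_of_perm_of_pairwise_lt _ _ _ hys_perm hys_pw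
  -- the B side pieces
  have hrem : (0 : Int) < (n : Int) - (j0 : Int) := by
    have : (j0 : Int) < (n : Int) := by exact_mod_cast hj0
    omega
  have hprev : (if (j0 : Int) > 0 then PySem.List.pyGetD s ((j0 : Int) - 1) 0 else 0)
      = prevv s j0 := by
    cases j0 with
    | zero => simp [prevv]
    | succ m =>
      rw [if_pos (by positivity)]
      have hc : ((m + 1 : Nat) : Int) - 1 = ((m : Nat) : Int) := by push_cast; ring
      rw [hc, PySem.List.pyGetD_natCast]
      unfold prevv
      rw [if_neg (by omega)]
      simp
  have hpref : PySem.List.pyGetD (prefOf s) ((j0 : Nat) : Int) 0 = Pt s j0 := by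
    rw [PySem.List.pyGetD_natCast]
    exact pref_getD s j0 (by omega)
  have hsv : PySem.List.pyGetD s ((j0 : Nat) : Int) 0 = t := by
    rw [PySem.List.pyGetD_natCast]; rfl
  show ansA S s n k j0
      = PySem.List.pyGetD
          (survivorsOf food_times (PySem.List.pyGetD s ((j0 : Nat) : Int) 0))
          (PySem.Int.mod
            (k - (PySem.List.pyGetD (prefOf s) ((j0 : Nat) : Int) 0
              + (if ((j0 : Nat) : Int) > 0 then PySem.List.pyGetD s (((j0 : Nat) : Int) - 1) 0 else 0)
                * ((n : Int) - ((j0 : Nat) : Int))))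
            ((n : Int) - ((j0 : Nat) : Int))) 0
  rw [hprev, hpref, hsv]
  have hidxeq : k - (Pt s j0 + prevv s j0 * ((n : Int) - (j0 : Int))) = k - fjv s n j0 := by
    unfold fjv; ring
  rw [hidxeq]
  set idx := PySem.Int.mod (k - fjv s n j0) ((n : Int) - (j0 : Int)) with hidxdef
  have hidx0 : 0 ≤ idx := PySem.Int.mod_nonneg _ hrem
  have hidx1 : idx < (n : Int) - (j0 : Int) := PySem.Int.mod_lt _ hrem
  have hlen1 : (PySem.List.sorted (S.drop j0) (fun p => p.2)).length = n - j0 := by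
    rw [hsub, hys_perm.length_eq, List.length_drop, hSlen]
  have hlen2 : (survivorsOf food_times t).length = n - j0 := by
    rw [survivors_eq, List.length_map, hys_perm.length_eq, List.length_drop, hSlen]
  unfold ansA
  rw [← hidxdef, survivors_eq, hsub]
  have hidx1' : idx.toNat < ((foodsOf food_times).filter (fun e => decide (t ≤ e.1))).length := by
    have := hys_perm.length_eq
    rw [this, List.length_drop, hSlen]
    omega
  rw [PySem.List.pyGetD_eq_getElem _ _ hidx0 (by omega),
      PySem.List.pyGetD_eq_getElem _ _ hidx0 (by rw [List.length_map]; omega)]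
  simp

theorem prevv_zero (s : List Int) : prevv s 0 = 0 := rfl

theorem fjv_zero (s : List Int) (n : Nat) : fjv s n 0 = 0 := by
  simp [fjv, Pt, prevv]

theorem Pt_zeros (s : List Int) :
    ∀ j : Nat, j ≤ s.length → (∀ i : Nat, i < j → s.getD i 0 = 0) → Pt s j = 0 := by
  intro j
  induction j with
  | zero => intro _ _; rfl
  | succ m ih =>
    intro hm hz
    rw [Pt_succ s m (by omega)]
    rw [ih (by omega) (fun i hi => hz i (by omega))]
    have := hz m (by omega)
    unfold sval
    omega

theorem main_eq (food_times : List Int) (k : Int) :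
    solution food_times k = solution_alt food_times k := by
  set n := food_times.length with hn
  set s := PySem.List.sorted food_times (fun x => x) with hsdef
  set S := PySem.List.sorted2 (foodsOf food_times) (fun p => p.1) (fun p => p.2) with hSdef
  have hSperm : S.Perm (foodsOf food_times) := PySem.List.sorted2_perm _ _ _ false
  have hflen : (foodsOf food_times).length = n := by simp [foodsOf]; rw [hn]
  have hSlen : S.length = n := hSperm.length_eq.trans hflen
  have hpwS : S.Pairwise WLE := sorted2_pairwise _
  have hsmap : S.map (fun e => e.1) = s := by
    have hperm2 : (S.map (fun e => e.1)).Perm food_times := by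
      have := hSperm.map (fun e => e.1)
      rwa [foods_map_fst] at this
    have hpw2 : (S.map (fun e => e.1)).Pairwise (· ≤ ·) :=
      List.Pairwise.map _ (fun {a b} hab => by
        rcases hab with h | ⟨h, _⟩
        · exact le_of_lt h
        · exact le_of_eq h) hpwS
    exact (PySem.List.sorted_id_eq_of_perm_of_pairwise _ _ hperm2 hpw2).symm
  have hslen : s.length = n := by rw [← hsmap, List.length_map, hSlen]
  have hnS : n = S.length := hSlen.symm
  have hgl : ∀ j : Nat, gv s s.length j = gv s n j := by intro j; rw [hslen]
  have hmono' : ∀ p q : Nat, p ≤ q → q < n → s.getD p 0 ≤ s.getD q 0 := by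
    intro p q hpq hq
    have hq' : q < s.length := by omega
    have hp' : p < s.length := by omega
    rw [List.getD_eq_getElem _ _ hp', List.getD_eq_getElem _ _ hq']
    exact PySem.List.sorted_id_getElem_mono food_times hpq (by rw [← hsdef]; exact hq')
  have hgvmono : ∀ i j : Nat, i ≤ j → j < s.length → gv s s.length i ≤ gv s s.length j := by
    intro i j hij hj
    exact gv_mono food_times s.length (by rw [← hsdef]) i j hij hj
  have hA0 : solution food_times k
      = solutionLoop (S.drop 0) ((n : Int) - ((0 : Nat) : Int)) (prevv s 0)
          (k - fjv s n 0) := by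
    simp only [List.drop_zero, fjv_zero, sub_zero, prevv_zero, Nat.cast_zero]
    rfl
  have hcond : PySem.List.pyGetD (prefOf s) ((n : Nat) : Int) 0 = Pt s n := by
    rw [PySem.List.pyGetD_natCast]
    exact pref_getD s n (by omega)
  have hgtop : 0 < n → gv s n (n - 1) = Pt s n := by
    intro hpos
    have hps := Pt_succ s (n - 1) (by omega)
    rw [show n - 1 + 1 = n from by omega] at hps
    unfold gv
    have hcast : (n : Int) - ((n - 1 : Nat) : Int) = 1 := by omega
    rw [hcast, mul_one, hps]
  by_cases hz : (n : Int) = 0 ∨ Pt s n ≤ k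
  · have hB : solution_alt food_times k = -1 := by
      show (if (n : Int) = 0 ∨ PySem.List.pyGetD (prefOf s) ((n : Nat) : Int) 0 ≤ k then (-1 : Int)
            else _) = -1
      rw [if_pos (by rw [hcond]; exact hz)]
    have hfailnone : ∀ i, 0 ≤ i → i < n → failb s k n i = false := by
      intro i _ hi
      rcases hz with hz | hz
      · omega
      · have h1 : gv s n i ≤ gv s n (n - 1) := by
          rw [← hgl, ← hgl]
          exact hgvmono i (n - 1) (by omega) (by omega)
        have h2 : gv s n i ≤ k := by
          rw [hgtop (by omega)] at h1
          omega
        unfold failb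
        simp only [Bool.and_eq_false_iff, decide_eq_false_iff_not, not_not, gt_iff_lt, not_lt]
        right
        exact h2
    have hA : solution food_times k = -1 := by
      rw [hA0]
      exact loopA_none S s k n hnS hsmap n 0 rfl (by omega)
        (fun i h1 h2 => hfailnone i (by omega) h2)
    rw [hA, hB]
  · push_neg at hz
    obtain ⟨hn0, hPtk⟩ := hz
    have hpos : 0 < n := by omega
    have hcastn : ((n : Nat) : Int) = ((s.length : Nat) : Int) := by rw [hslen]
    have hgtopk : gv s s.length (((n : Int) - 1).toNat) > k := by
      have : ((n : Int) - 1).toNat = n - 1 := by omega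
      rw [this, hgl, hgtop hpos]
      omega
    obtain ⟨r, hreq, hr0, hr1, hrg, hrleast⟩ :=
      bsearch_spec s k ((n : Int) - 1).toNat 0 ((n : Int) - 1) (by omega) le_rfl (by omega)
        (by omega) (fun i hi => absurd hi (by omega)) hgtopk hgvmono
    have hrn : r < n := by omega
    have hrgn : gv s n r > k := by rw [← hgl]; exact hrg
    have hrleastn : ∀ i : Nat, i < r → gv s n i ≤ k := by
      intro i hi
      rw [← hgl]
      exact hrleast i hi
    have hbs : bsearch (prefOf s) s ((n : Nat) : Int) k 0 ((n : Int) - 1) = (r : Int) := by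
      rw [hcastn]
      rw [hcastn] at hreq
      exact hreq
    have hBshape : solution_alt food_times k
        = if bsearch (prefOf s) s ((n : Nat) : Int) k 0 (((n : Nat) : Int) - 1) = 0
              ∧ PySem.List.pyGetD s 0 0 = 0 then
            (if skipZeros s ((n : Nat) : Int)
                  (bsearch (prefOf s) s ((n : Nat) : Int) k 0 (((n : Nat) : Int) - 1))
                = ((n : Nat) : Int) then (-1 : Int)
             else finishAt food_times k s (prefOf s) ((n : Nat) : Int)
                (skipZeros s ((n : Nat) : Int)
                  (bsearch (prefOf s) s ((n : Nat) : Int) k 0 (((n : Nat) : Int) - 1))))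
          else finishAt food_times k s (prefOf s) ((n : Nat) : Int)
            (bsearch (prefOf s) s ((n : Nat) : Int) k 0 (((n : Nat) : Int) - 1)) := by
      show (if (n : Int) = 0 ∨ PySem.List.pyGetD (prefOf s) ((n : Nat) : Int) 0 ≤ k then (-1 : Int)
            else _) = _
      rw [if_neg (by rw [hcond]; push_neg; exact ⟨hn0, hPtk⟩)]
    rw [hBshape, hbs]
    have hs00 : PySem.List.pyGetD s 0 0 = s.getD 0 0 := PySem.List.pyGetD_zero s 0
    by_cases hzz : r = 0 ∧ s.getD 0 0 = 0
    · obtain ⟨hr00, hsz⟩ := hzz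
      have hgv0 : gv s n 0 = 0 := by
        unfold gv Pt
        rw [show sval s 0 = 0 from hsz]
        simp
      have hk0 : k < 0 := by
        rw [hr00] at hrgn
        omega
      obtain ⟨r2, hr2eq, hr2a, hr2b, hr2zero, hr2nz⟩ :=
        skip_spec s ((s.length : Int) - 0).toNat 0 (by omega) (by omega) (by omega)
      have hsk : skipZeros s ((n : Nat) : Int) (r : Int) = (r2 : Int) := by
        rw [hr00, hcastn]
        exact_mod_cast hr2eq
      rw [if_pos (by rw [hr00, hs00]; exact ⟨rfl, hsz⟩), hsk]
      have hprevz : ∀ i : Nat, i ≤ r2 → prevv s i = 0 := by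
        intro i hi
        unfold prevv
        split_ifs with h
        · rfl
        · exact hr2zero (i - 1) (by omega) (by omega)
      by_cases hr2n : r2 = n
      · rw [if_pos (by rw [hr2n])]
        have hfailnone : ∀ i, 0 ≤ i → i < n → failb s k n i = false := by
          intro i _ hi
          unfold failb
          simp only [Bool.and_eq_false_iff, decide_eq_false_iff_not, not_not]
          left
          unfold sval
          rw [hprevz i (by omega), hr2zero i (by omega) (by omega)]
        rw [hA0]
        exact loopA_none S s k n hnS hsmap n 0 rfl (by omega)
          (fun i h1 h2 => hfailnone i (by omega) h2)
      · have hr2n' : r2 < n := by omega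
        rw [if_neg (by intro hcc; exact hr2n (by exact_mod_cast hcc))]
        have hr2pos : 0 < r2 := by
          rcases Nat.eq_zero_or_pos r2 with h | h
          · exfalso
            exact hr2nz (by omega) (by rw [h]; exact hsz)
          · exact h
        have hsr2 : 0 < s.getD r2 0 := by
          have h1 : s.getD 0 0 ≤ s.getD r2 0 := hmono' 0 r2 (by omega) (by omega)
          have h2 := hr2nz (by omega)
          omega
        have hPtr2 : Pt s r2 = 0 :=
          Pt_zeros s r2 (by omega) (fun i hi => hr2zero i (by omega) hi)
        have hfail : failb s k n r2 = true := by
          unfold failb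
          simp only [Bool.and_eq_true, decide_eq_true_eq, gt_iff_lt]
          constructor
          · rw [hprevz r2 le_rfl]
            unfold sval
            omega
          · unfold gv sval
            rw [hPtr2]
            have h1 : (0 : Int) < s.getD r2 0 * ((n : Int) - (r2 : Int)) :=
              mul_pos hsr2 (by omega)
            omega
        have hfailmin : ∀ i, i < r2 → failb s k n i = false := by
          intro i hi
          unfold failb
          simp only [Bool.and_eq_false_iff, decide_eq_false_iff_not, not_not]
          left
          unfold sval
          rw [hprevz i (by omega), hr2zero i (by omega) (by omega)]
        have hA : solution food_times k = ansA S s n k r2 := by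
          rw [hA0]
          exact loopA_fail S s k n hnS hsmap r2 (by omega) hfail r2 0 (by omega) (by omega)
            (fun i h1 h2 => hfailmin i h2)
        have hGS2 : sval s r2 ≠ prevv s r2 := by
          rw [hprevz r2 le_rfl]
          unfold sval
          omega
        rw [hA]
        exact ansA_eq_finish food_times k r2 (by omega) hGS2
    · rw [if_neg (by
        intro hcc
        exact hzz ⟨by exact_mod_cast hcc.1, by rw [← hs00]; exact hcc.2⟩)]
      have hGS2 : sval s r ≠ prevv s r := by
        by_cases hr0' : r = 0
        · subst hr0'
          rw [prevv_zero]
          intro heq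
          exact hzz ⟨rfl, heq⟩
        · intro heq
          obtain ⟨m, rfl⟩ : ∃ m, r = m + 1 := ⟨r - 1, by omega⟩
          have hpm : prevv s (m + 1) = s.getD m 0 := by
            unfold prevv
            rw [if_neg (by omega)]
            simp
          rw [hpm] at heq
          have hdup := gv_dup s n m (by omega) heq
          have hle := hrleastn m (by omega)
          omega
      have hfail : failb s k n r = true := by
        unfold failb
        simp only [Bool.and_eq_true, decide_eq_true_eq, gt_iff_lt]
        exact ⟨hGS2, hrgn⟩
      have hfailmin : ∀ i, i < r → failb s k n i = false := by
        intro i hi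
        unfold failb
        simp only [Bool.and_eq_false_iff, decide_eq_false_iff_not, not_not, gt_iff_lt, not_lt]
        right
        exact hrleastn i hi
      have hA : solution food_times k = ansA S s n k r := by
        rw [hA0]
        exact loopA_fail S s k n hnS hsmap r (by omega) hfail r 0 (by omega) (by omega)
          (fun i h1 h2 => hfailmin i h2)
      rw [hA]
      exact ansA_eq_finish food_times k r (by omega) hGS2

-- ===== VERDICT (by name: the statement is the Claim_ definition above) =====
theorem solution_spec : Claim_equal_solution := by
  unfold Claim_equal_solution
  intro food_times k _
  unfold Spec_solution
  exact main_eq food_times k
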